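-- pv_equiv track=rewrite | github.com/BadriNaathR/Idea2Spec | backend/crew_service.py | _summarize_code
-- ===== SOURCE A (Python) =====
-- from typing import Dict, Any, List, Optional
--
-- def _summarize_code(chunks: List[Dict[str, Any]], max_length: int = 15000) -> str:
--     """Summarize code chunks for context"""
--     summary_parts = []
--     current_length = 0
--
--     # Group by file
--     files = {}
--     for chunk in chunks:
--         file_path = chunk.get('file_path', 'unknown')
--         if file_path not in files:
--             files[file_path] = []
--         files[file_path].append(chunk)
--
--     # Summarize each file
--     for file_path, file_chunks in files.items():
--         file_summary = f"\n--- {file_path} ---\n"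
--         file_summary += f"Language: {file_chunks[0].get('language', 'unknown')}\n"
--
--         # Add first chunk of each file
--         if file_chunks:
--             content = file_chunks[0].get('content', '')[:500]
--             file_summary += f"Content:\n{content}\n"
--
--         if current_length + len(file_summary) < max_length:
--             summary_parts.append(file_summary)
--             current_length += len(file_summary)
--         else:
--             break
--
--     return "\n".join(summary_parts)
-- ===== SOURCE B (Python) =====
-- def _summarize_code(chunks, max_length=15000):
--     """Summarize code chunks for context (single pass, no grouping dict)."""
--     summary_parts = []
--     current_length = 0
--     seen = set()
--     for chunk in chunks:
--         file_path = chunk.get('file_path', 'unknown')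
--         if file_path in seen:
--             continue
--         seen.add(file_path)
--         file_summary = (
--             f"\n--- {file_path} ---\n"
--             f"Language: {chunk.get('language', 'unknown')}\n"
--             f"Content:\n{chunk.get('content', '')[:500]}\n"
--         )
--         if current_length + len(file_summary) < max_length:
--             summary_parts.append(file_summary)
--             current_length += len(file_summary)
--         else:
--             break
--     return "\n".join(summary_parts)
-- ===== Notes on version B (the rewrite author's own statement) =====
-- stated objective: simpler
-- what changed: B replaces A's two-pass design (build a dict grouping all chunks by file, then loop over the groups) with one pass over chunks guarded by a seen-set, since only the first chunk of each file is ever used.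
import Mathlib
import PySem

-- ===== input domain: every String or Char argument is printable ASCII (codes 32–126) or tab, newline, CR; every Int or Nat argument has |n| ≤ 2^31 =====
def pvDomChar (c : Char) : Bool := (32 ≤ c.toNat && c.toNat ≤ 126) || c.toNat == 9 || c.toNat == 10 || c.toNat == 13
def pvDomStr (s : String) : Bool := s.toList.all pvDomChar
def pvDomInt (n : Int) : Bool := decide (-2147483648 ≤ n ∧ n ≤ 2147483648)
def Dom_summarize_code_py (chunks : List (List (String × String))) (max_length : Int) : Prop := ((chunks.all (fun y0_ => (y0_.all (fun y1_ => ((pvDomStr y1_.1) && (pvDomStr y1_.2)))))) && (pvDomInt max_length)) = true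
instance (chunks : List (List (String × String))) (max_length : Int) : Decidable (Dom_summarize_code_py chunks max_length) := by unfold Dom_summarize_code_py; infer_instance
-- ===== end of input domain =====

-- B fuses A's dict-of-lists grouping pass and the summarising pass into ONE pass over
-- chunks with a seen-set (only the first chunk per file is ever used); same return value.

-- chunk.get(k, dflt) on the association-list chunk (first match, Python dict semantics)
def pvChunkGet (c : List (String × String)) (k dflt : String) : String :=
  (PySem.Dict.mk c).getD k dflt

-- ===== PORT A =====
-- file summary built from a file's grouped chunk list, as A writes it (List Char side)
def pvSummaryA (fp : String) (fcs : List (List (String × String))) : List Char :=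
  let s1 := "\n--- ".toList ++ fp.toList ++ " ---\n".toList
  -- file_chunks[0]: 'none' is unreachable (every grouped list is nonempty; Python would raise IndexError)
  match PySem.List.pyGet? fcs 0 with
  | none => s1
  | some c0 =>
    let s2 := s1 ++ "Language: ".toList ++ (pvChunkGet c0 "language" "unknown").toList ++ "\n".toList
    if fcs.isEmpty then s2
    else
      let content := PySem.List.slice (pvChunkGet c0 "content" "").toList none (some 500)
      s2 ++ "Content:\n".toList ++ content ++ "\n".toList

-- the 'for file_path, file_chunks in files.items()' loop with its break
def pvLoopA (max_length : Int) :
    List (String × List (List (String × String))) → List (List Char) → Int → List (List Char)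
  | [], parts, _ => parts
  | (fp, fcs) :: rest, parts, cl =>
    let fs := pvSummaryA fp fcs
    if cl + (fs.length : Int) < max_length then
      pvLoopA max_length rest (parts ++ [fs]) (cl + (fs.length : Int))
    else parts

def summarize_code_py (chunks : List (List (String × String))) (max_length : Int) : String :=
  let files := chunks.foldl
    (fun d c => d.modify (pvChunkGet c "file_path" "unknown") [] (· ++ [c])) PySem.Dict.empty
  String.ofList (PySem.Chars.join "\n".toList (pvLoopA max_length files.items [] 0))

-- ===== PORT B =====
-- file summary built directly from one chunk, as B writes it
def pvSummaryB (c : List (String × String)) : List Char :=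
  "\n--- ".toList ++ (pvChunkGet c "file_path" "unknown").toList ++ " ---\n".toList ++
  "Language: ".toList ++ (pvChunkGet c "language" "unknown").toList ++ "\n".toList ++
  "Content:\n".toList ++ PySem.List.slice (pvChunkGet c "content" "").toList none (some 500) ++ "\n".toList

-- B's single pass with the seen-set, continue and break
def pvLoopB (max_length : Int) :
    List (List (String × String)) → PySem.Set String → List (List Char) → Int → List (List Char)
  | [], _, parts, _ => parts
  | c :: cs, seen, parts, cl =>
    let fp := pvChunkGet c "file_path" "unknown"
    if PySem.Set.contains seen fp then pvLoopB max_length cs seen parts cl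
    else
      let fs := pvSummaryB c
      if cl + (fs.length : Int) < max_length then
        pvLoopB max_length cs (PySem.Set.add seen fp) (parts ++ [fs]) (cl + (fs.length : Int))
      else parts

def summarize_code_py_alt (chunks : List (List (String × String))) (max_length : Int) : String :=
  String.ofList (PySem.Chars.join "\n".toList (pvLoopB max_length chunks PySem.Set.empty [] 0))

-- ===== PRECONDITION & SPEC =====
def Spec_summarize_code_py (chunks : List (List (String × String))) (max_length : Int) (out : String) : Prop := out = summarize_code_py_alt chunks max_length
instance (chunks : List (List (String × String))) (max_length : Int) (out : String) : Decidable (Spec_summarize_code_py chunks max_length out) := by unfold Spec_summarize_code_py; infer_instance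

-- ===== CLAIM (what is proved, stated in full; the proofs are below) =====
def Claim_equal_summarize_code_py : Prop := ∀ (chunks : List (List (String × String))) (max_length : Int), Dom_summarize_code_py chunks max_length → Spec_summarize_code_py chunks max_length (summarize_code_py chunks max_length)

-- ===== LEMMAS AND PROOFS =====

-- the file_path key of a chunk
def pvKey (c : List (String × String)) : String := pvChunkGet c "file_path" "unknown"

-- first chunk per new file_path, in first-appearance order, given an already-seen set
def pvFirsts (seen : PySem.Set String) :
    List (List (String × String)) → List (String × List (String × String))
  | [] => []
  | c :: cs =>
    if PySem.Set.contains seen (pvKey c) then pvFirsts seen cs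
    else (pvKey c, c) :: pvFirsts (PySem.Set.add seen (pvKey c)) cs

-- the break-loop over just the first chunk of each file: both ports' loops reduce to it
def pvLoopM (max_length : Int) :
    List (List (String × String)) → List (List Char) → Int → List (List Char)
  | [], parts, _ => parts
  | c :: cs, parts, cl =>
    let fs := pvSummaryB c
    if cl + (fs.length : Int) < max_length then
      pvLoopM max_length cs (parts ++ [fs]) (cl + (fs.length : Int))
    else parts

theorem pvUpdate_eq_firsts (chunks : List (List (String × String))) (seen : PySem.Set String) :
    PySem.Set.update seen (chunks.map pvKey) = seen ++ (pvFirsts seen chunks).map (·.1) := by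
  induction chunks generalizing seen with
  | nil => simp [pvFirsts, PySem.Set.update]
  | cons c cs ih =>
    rw [List.map_cons, PySem.Set.update_cons, ih]
    by_cases h : pvKey c ∈ seen
    · simp [pvFirsts, h, PySem.Set.add, PySem.Set.contains]
    · simp [pvFirsts, h, PySem.Set.add, PySem.Set.contains]

theorem pvFirsts_mem (chunks : List (List (String × String))) (seen : PySem.Set String)
    (q : String × List (String × String)) (hq : q ∈ pvFirsts seen chunks) :
    q.1 ∉ seen ∧ q.1 = pvKey q.2 ∧
      (chunks.filter (fun c => pvKey c == q.1)).head? = some q.2 := by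
  induction chunks generalizing seen with
  | nil => simp [pvFirsts] at hq
  | cons c cs ih =>
    by_cases h : pvKey c ∈ seen
    · rw [pvFirsts, if_pos (by simpa [PySem.Set.contains] using h)] at hq
      obtain ⟨hns, hk, hh⟩ := ih seen hq
      have hne : (pvKey c == q.1) = false := by
        rw [beq_eq_false_iff_ne]
        intro he
        exact hns (he ▸ h)
      refine ⟨hns, hk, ?_⟩
      rw [List.filter_cons, hne]
      exact hh
    · rw [pvFirsts, if_neg (by simpa [PySem.Set.contains] using h)] at hq
      rcases List.mem_cons.mp hq with rfl | hq'
      · exact ⟨h, rfl, by simp⟩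
      · obtain ⟨hns, hk, hh⟩ := ih _ hq'
        have h1 : q.1 ∉ seen ∧ q.1 ≠ pvKey c := by
          constructor
          · intro hm; exact hns ((PySem.Set.mem_add seen (pvKey c) q.1).mpr (Or.inl hm))
          · intro he; exact hns ((PySem.Set.mem_add seen (pvKey c) q.1).mpr (Or.inr he))
        refine ⟨h1.1, hk, ?_⟩
        rw [List.filter_cons]
        have hne : (pvKey c == q.1) = false := by
          rw [beq_eq_false_iff_ne]; exact fun he => h1.2 he.symm
        rw [hne]
        exact hh



theorem pvItems_eq (chunks : List (List (String × String))) :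
    (chunks.foldl
      (fun d c => d.modify (pvChunkGet c "file_path" "unknown") [] (· ++ [c])) PySem.Dict.empty).items
      = (pvFirsts PySem.Set.empty chunks).map
          (fun q => (q.1, chunks.filter (fun c => pvKey c == q.1))) := by
  have hfold : chunks.foldl
      (fun d c => d.modify (pvChunkGet c "file_path" "unknown") [] (· ++ [c])) PySem.Dict.empty
      = chunks.foldl
      (fun (d : PySem.Dict String (List (List (String × String)))) c =>
        d.modify (pvKey c) [] ((fun d c => (· ++ [c])) d c)) PySem.Dict.empty := rfl
  rw [hfold]
  have hnd := PySem.Dict.nodup_keys_foldl_modify_key chunks pvKey []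
      (fun d c => (· ++ [c])) PySem.Dict.empty (by simp [PySem.Dict.keys_empty])
  rw [PySem.Dict.items_eq_map_keys _ hnd []]
  have hkeys := PySem.Dict.keys_foldl_modify_key chunks pvKey []
      (fun d c => (· ++ [c])) (PySem.Dict.empty (κ := String) (ν := List (List (String × String))))
  rw [PySem.Dict.keys_empty] at hkeys
  rw [hkeys, pvUpdate_eq_firsts, List.nil_append, List.map_map]
  apply List.map_congr_left
  intro q _
  simp only [Function.comp]
  congr 1
  have := PySem.Dict.getD_foldl_modify_append (chunks.map (fun c => (pvKey c, c)))
      (PySem.Dict.empty (κ := String)) q.1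
  rw [List.foldl_map] at this
  simp only [PySem.Dict.getD_empty, List.nil_append] at this
  rw [this, List.filter_map, List.map_map]
  show List.map (fun c => c) _ = _
  rw [List.map_id']
  rfl

theorem pvSummary_eq (fp : String) (fcs : List (List (String × String)))
    (c : List (String × String)) (hh : fcs.head? = some c) (hfp : fp = pvKey c) :
    pvSummaryA fp fcs = pvSummaryB c := by
  obtain ⟨t, rfl⟩ : ∃ t, fcs = c :: t := by
    cases fcs with
    | nil => simp at hh
    | cons a t =>
      obtain rfl : a = c := by simpa using hh
      exact ⟨t, rfl⟩
  subst hfp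
  simp [pvSummaryA, pvSummaryB, pvKey]




theorem pvLoopA_eq_loopM (ml : Int) (F : String -> List (List (String × String)))
    (l : List (String × List (String × String)))
    (h : ∀ q ∈ l, pvSummaryA q.1 (F q.1) = pvSummaryB q.2) (parts : List (List Char)) (cl : Int) :
    pvLoopA ml (l.map (fun q => (q.1, F q.1))) parts cl = pvLoopM ml (l.map (·.2)) parts cl := by
  induction l generalizing parts cl with
  | nil => simp [pvLoopA, pvLoopM]
  | cons q rest ih =>
    simp only [List.map_cons]
    rw [pvLoopA, pvLoopM]
    simp only [h q (List.mem_cons_self)]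
    split
    · exact ih (fun p hp => h p (List.mem_cons_of_mem _ hp)) _ _
    · rfl

theorem pvLoopB_eq_loopM (ml : Int) (chunks : List (List (String × String)))
    (seen : PySem.Set String) (parts : List (List Char)) (cl : Int) :
    pvLoopB ml chunks seen parts cl = pvLoopM ml ((pvFirsts seen chunks).map (·.2)) parts cl := by
  induction chunks generalizing seen parts cl with
  | nil => simp [pvLoopB, pvLoopM, pvFirsts]
  | cons c cs ih =>
    rw [pvLoopB, pvFirsts]
    by_cases h : PySem.Set.contains seen (pvKey c) = true
    · rw [if_pos (show PySem.Set.contains seen (pvChunkGet c "file_path" "unknown") = true from h),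
        if_pos h, ih]
    · rw [if_neg (show ¬ PySem.Set.contains seen (pvChunkGet c "file_path" "unknown") = true from h),
        if_neg h, List.map_cons, pvLoopM]
      show (if cl + ((pvSummaryB c).length : Int) < ml then
          pvLoopB ml cs (PySem.Set.add seen (pvChunkGet c "file_path" "unknown"))
            (parts ++ [pvSummaryB c]) (cl + ((pvSummaryB c).length : Int))
        else parts) = _
      by_cases hlt : cl + ((pvSummaryB c).length : Int) < ml
      · rw [if_pos hlt, if_pos hlt]
        exact ih _ _ _
      · rw [if_neg hlt, if_neg hlt]

-- ===== VERDICT (by name: the statement is the Claim_ definition above) =====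
theorem summarize_code_py_spec : Claim_equal_summarize_code_py := by
  intro chunks max_length _
  unfold Spec_summarize_code_py summarize_code_py summarize_code_py_alt
  simp only []
  rw [pvItems_eq, pvLoopB_eq_loopM,
    pvLoopA_eq_loopM max_length (fun k => chunks.filter (fun c => pvKey c == k))]
  intro q hq
  obtain ⟨_, hkey, hhead⟩ := pvFirsts_mem chunks PySem.Set.empty q hq
  exact pvSummary_eq q.1 _ q.2 hhead hkey
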